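-- pv_equiv track=rewrite | github.com/tantan1379/mygit | Preprocess/RPE flatten/find_RPE.py | get_max_index
-- ===== SOURCE A (Python) =====
-- def get_max_index(matrix):
--     max_index_list = list()
--     for j in range(len(matrix[0])):
--         one_list=[]
--         for i in range(len(matrix)):
--             one_list.append(int(matrix[i][j]))
--         max_index_list.append(one_list.index(max(one_list)))
--     return max_index_list
-- ===== SOURCE B (Python) =====
-- def get_max_index(matrix):
--     result = []
--     for j in range(len(matrix[0])):
--         best_val = int(matrix[0][j])
--         best_idx = 0
--         for i, row in enumerate(matrix[1:], 1):
--             v = int(row[j])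
--             if v > best_val:
--                 best_val, best_idx = v, i
--         result.append(best_idx)
--     return result
-- ===== Notes on version B (the rewrite author's own statement) =====
-- stated objective: simpler
-- what changed: Replaces the build-column-list, then max(), then .index() triple scan per column with a single running-argmax pass per column (strict > keeps the first occurrence on ties, matching max+.index).
import Mathlib
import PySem

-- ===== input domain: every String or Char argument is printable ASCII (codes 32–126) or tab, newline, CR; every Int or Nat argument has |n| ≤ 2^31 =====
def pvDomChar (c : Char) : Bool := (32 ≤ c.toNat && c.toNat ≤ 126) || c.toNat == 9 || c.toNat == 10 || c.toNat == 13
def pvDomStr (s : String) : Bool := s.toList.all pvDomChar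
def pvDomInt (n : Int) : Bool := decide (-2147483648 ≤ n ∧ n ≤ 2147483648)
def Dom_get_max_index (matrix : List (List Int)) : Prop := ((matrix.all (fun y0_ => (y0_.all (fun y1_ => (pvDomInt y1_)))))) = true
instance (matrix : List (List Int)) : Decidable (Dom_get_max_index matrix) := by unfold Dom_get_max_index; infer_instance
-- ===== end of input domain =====

-- B replaces A's build-column-list / max() / .index() triple scan per column by a single
-- running-argmax pass per column (strict > keeps the first maximum, like max+.index): simpler.

-- ===== PORT A =====
def get_max_index (matrix : List (List Int)) : List Int :=
  (PySem.List.pyRange 0 ((PySem.List.pyGetD matrix 0 []).length : Int) 1).foldl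
    (fun max_index_list j =>
      let one_list : List Int :=
        (PySem.List.pyRange 0 (matrix.length : Int) 1).foldl
          (fun one_list i => one_list ++ [PySem.List.pyGetD (PySem.List.pyGetD matrix i []) j 0]) []
      max_index_list ++
        [(((PySem.List.index? one_list ((PySem.List.max? one_list (fun v => v)).getD 0)).getD 0 : Nat) : Int)])
    []

-- ===== PORT B =====
-- inner loop of B: 'for i, row in enumerate(matrix[1:], 1): …' with running best (bv, bi)
def pvBestLoop (rows : List (List Int)) (j : Nat) (i : Nat) (bv : Int) (bi : Nat) : Nat :=
  match rows with
  | [] => bi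
  | row :: rs =>
    let v := row.getD j 0
    if bv < v then pvBestLoop rs j (i + 1) v i else pvBestLoop rs j (i + 1) bv bi

def get_max_index_alt (matrix : List (List Int)) : List Int :=
  (List.range (matrix.headD []).length).map
    (fun j => ((pvBestLoop matrix.tail j 1 ((matrix.headD []).getD j 0) 0 : Nat) : Int))

-- ===== PRECONDITION & SPEC =====
-- Python A raises IndexError on an empty matrix (matrix[0]) and when some row is shorter than
-- the first row (matrix[i][j]); exactly those inputs are excluded (Python B raises there too).
def Pre_get_max_index (matrix : List (List Int)) : Prop :=
  matrix ≠ [] ∧ ∀ row ∈ matrix, (matrix.headD []).length ≤ row.length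
instance (matrix : List (List Int)) : Decidable (Pre_get_max_index matrix) := by
  unfold Pre_get_max_index; infer_instance
def pvWitness_get_max_index : List (List Int) := [[1, 2], [3, 0]]

def Spec_get_max_index (matrix : List (List Int)) (out : List Int) : Prop := out = get_max_index_alt matrix
instance (matrix : List (List Int)) (out : List Int) : Decidable (Spec_get_max_index matrix out) := by unfold Spec_get_max_index; infer_instance

-- ===== CLAIM (what is proved, stated in full; the proofs are below) =====
def Claim_equal_get_max_index : Prop := ∀ (matrix : List (List Int)), Dom_get_max_index matrix → Pre_get_max_index matrix → Spec_get_max_index matrix (get_max_index matrix)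

-- ===== LEMMAS AND PROOFS =====

-- Invariant of B's inner loop: if bv is the maximum of the prefix 'pre' already scanned and bi its
-- first index there, the loop computes the first index of the maximum of pre ++ remaining column.
theorem pvBestLoop_invariant (rows : List (List Int)) (j : Nat) :
    ∀ (pre : List Int) (bv : Int) (bi : Nat),
      (∀ x ∈ pre, x ≤ bv) → PySem.List.index? pre bv = some bi →
      pvBestLoop rows j pre.length bv bi =
        ((PySem.List.index? (pre ++ rows.map (fun r => r.getD j 0))
          ((PySem.List.max? (pre ++ rows.map (fun r => r.getD j 0)) (fun v => v)).getD 0)).getD 0) := by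
  induction rows with
  | nil =>
    intro pre bv bi hle hidx
    have hmem : bv ∈ pre := by
      have := PySem.List.index?_isSome_iff (xs := pre) (v := bv)
      exact this.mp (by rw [hidx]; rfl)
    have hne : pre ≠ [] := by rintro rfl; simp at hmem
    obtain ⟨m, hm⟩ : ∃ m, PySem.List.max? pre (fun v => v) = some m := by
      cases h : PySem.List.max? pre (fun v => v) with
      | none => exact absurd ((PySem.List.max?_eq_none_iff (xs := pre) (key := fun v => v)).mp h) hne
      | some m => exact ⟨m, rfl⟩
    have hmmem : m ∈ pre := PySem.List.max?_mem hm
    have hmax : ∀ y ∈ pre, y ≤ m := fun y hy => PySem.List.max?_isMax hm y hy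
    have : m = bv := le_antisymm (hle m hmmem) (hmax bv hmem)
    subst this
    simp only [pvBestLoop, List.map_nil, List.append_nil, hm, Option.getD_some, hidx]
  | cons r rs ih =>
    intro pre bv bi hle hidx
    have hmem : bv ∈ pre := by
      have := PySem.List.index?_isSome_iff (xs := pre) (v := bv)
      exact this.mp (by rw [hidx]; rfl)
    have hsplit : pre ++ (r :: rs).map (fun r => r.getD j 0)
        = (pre ++ [r.getD j 0]) ++ rs.map (fun r => r.getD j 0) := by simp
    rw [hsplit]
    show pvBestLoop (r :: rs) j pre.length bv bi = _
    unfold pvBestLoop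
    by_cases hlt : bv < r.getD j 0
    · simp only [hlt, if_true]
      have hnotmem : r.getD j 0 ∉ pre := fun h => absurd (hle _ h) (not_le.mpr hlt)
      have h1 : ∀ x ∈ pre ++ [r.getD j 0], x ≤ r.getD j 0 := by
        intro x hx
        rcases List.mem_append.mp hx with h | h
        · exact le_of_lt (lt_of_le_of_lt (hle x h) hlt)
        · exact List.mem_singleton.mp h ▸ le_refl _
      have h2 : PySem.List.index? (pre ++ [r.getD j 0]) (r.getD j 0) = some pre.length :=
        PySem.List.index?_append_singleton_self pre (r.getD j 0) hnotmem
      have := ih (pre ++ [r.getD j 0]) (r.getD j 0) pre.length h1 h2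
      simpa using this
    · simp only [hlt, if_false]
      have h1 : ∀ x ∈ pre ++ [r.getD j 0], x ≤ bv := by
        intro x hx
        rcases List.mem_append.mp hx with h | h
        · exact hle x h
        · exact List.mem_singleton.mp h ▸ le_of_not_gt hlt
      have h2 : PySem.List.index? (pre ++ [r.getD j 0]) bv = some bi := by
        rw [PySem.List.index?_append_of_mem _ hmem]; exact hidx
      have := ih (pre ++ [r.getD j 0]) bv bi h1 h2
      simpa using this

-- per-column agreement: A's index(max(column)) equals B's running argmax, for every column j
theorem percol (r0 : List Int) (rest : List (List Int)) (j : Nat) :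
    ((PySem.List.index? ((r0 :: rest).map (fun r => r.getD j 0))
        ((PySem.List.max? ((r0 :: rest).map (fun r => r.getD j 0)) (fun v => v)).getD 0)).getD 0)
      = pvBestLoop rest j 1 (r0.getD j 0) 0 := by
  have := pvBestLoop_invariant rest j [r0.getD j 0] (r0.getD j 0) 0
    (by intro x hx; exact List.mem_singleton.mp hx ▸ le_refl _)
    (PySem.List.index?_cons_self _ _)
  simpa using this.symm

-- A's inner foldl builds exactly the j-th column as a map over the rows
theorem one_list_eq (matrix : List (List Int)) (j : Int) :
    (PySem.List.pyRange 0 (matrix.length : Int) 1).foldl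
        (fun one_list i => one_list ++ [PySem.List.pyGetD (PySem.List.pyGetD matrix i []) j 0]) []
      = matrix.map (fun r => PySem.List.pyGetD r j 0) := by
  rw [PySem.List.foldl_append_singleton_eq_map]
  have h1 : (PySem.List.pyRange 0 (matrix.length : Int) 1).map
      (fun i => PySem.List.pyGetD (PySem.List.pyGetD matrix i []) j 0)
      = ((PySem.List.pyRange 0 (matrix.length : Int) 1).map
          (fun i => PySem.List.pyGetD matrix i [])).map (fun r => PySem.List.pyGetD r j 0) := by
    rw [List.map_map]; rfl
  rw [h1, PySem.List.map_pyGetD_pyRange_zero']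
  simp

-- ===== VERDICT (by name: the statement is the Claim_ definition above) =====
theorem get_max_index_spec : Claim_equal_get_max_index := by
  intro matrix _ hpre
  obtain ⟨hne, -⟩ := hpre
  obtain ⟨r0, rest, rfl⟩ : ∃ r0 rest, matrix = r0 :: rest := by
    cases matrix with
    | nil => exact absurd rfl hne
    | cons a b => exact ⟨a, b, rfl⟩
  unfold Spec_get_max_index get_max_index get_max_index_alt
  rw [PySem.List.foldl_append_singleton_eq_map]
  simp only [one_list_eq]
  have hhead : PySem.List.pyGetD (r0 :: rest) 0 [] = r0 := by
    simp [PySem.List.pyGetD_zero_cons]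
  rw [hhead]
  rw [show ((r0.length : Int)) = ((r0.length : Nat) : Int) from rfl,
      PySem.List.pyRange_zero_nat]
  rw [List.map_map]
  simp only [List.headD, List.tail]
  apply List.map_congr_left
  intro k _
  simp only [Function.comp]
  have hcol : ∀ r : List Int, PySem.List.pyGetD r ((k : Nat) : Int) 0 = r.getD k 0 := by
    intro r; simp [PySem.List.pyGetD_natCast]
  simp only [hcol]
  rw [show ((r0 :: rest).map fun r => r.getD k 0)
        = r0.getD k 0 :: rest.map (fun r => r.getD k 0) from rfl] at *
  have := percol r0 rest k
  simp only [List.map_cons] at this ⊢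
  exact_mod_cast congrArg (fun n : Nat => (n : Int)) this
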